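-- pv_equiv track=rewrite | github.com/joaofernandessaad-cpu/Ex-de-programa-ao-2-joao-saad | funcoes.py | calcula_pontos_regra_simples
-- ===== SOURCE A (Python) =====
-- def calcula_pontos_regra_simples(dados):
--     resultado = {1:0, 2:0, 3:0, 4:0, 5:0, 6:0}
--
--     for d in dados:
--         if d == 1:
--             resultado[1] += 1
--         if d == 2:
--             resultado[2] += 2
--         if d == 3:
--             resultado[3] += 3
--         if d == 4:
--             resultado[4] += 4
--         if d == 5:
--             resultado[5] += 5
--         if d == 6:
--             resultado[6] += 6
--
--     return resultado
-- ===== SOURCE B (Python) =====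
-- def calcula_pontos_regra_simples(dados):
--     # Divide and conquer: split the roll list in half, score each half
--     # recursively, and merge the two score dicts by adding per-face totals.
--     if not dados:
--         return {k: 0 for k in range(1, 7)}
--     if len(dados) == 1:
--         d = dados[0]
--         return {k: (k if d == k else 0) for k in range(1, 7)}
--     mid = len(dados) // 2
--     esq = calcula_pontos_regra_simples(dados[:mid])
--     dire = calcula_pontos_regra_simples(dados[mid:])
--     return {k: esq[k] + dire[k] for k in range(1, 7)}
-- ===== Notes on version B (the rewrite author's own statement) =====
-- stated objective: alternative
-- what changed: Replaces A's single imperative loop of six conditional increments with a divide-and-conquer recursion: split the list in half, score each half recursively, and merge the two per-face score dicts by addition.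
import Mathlib
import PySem

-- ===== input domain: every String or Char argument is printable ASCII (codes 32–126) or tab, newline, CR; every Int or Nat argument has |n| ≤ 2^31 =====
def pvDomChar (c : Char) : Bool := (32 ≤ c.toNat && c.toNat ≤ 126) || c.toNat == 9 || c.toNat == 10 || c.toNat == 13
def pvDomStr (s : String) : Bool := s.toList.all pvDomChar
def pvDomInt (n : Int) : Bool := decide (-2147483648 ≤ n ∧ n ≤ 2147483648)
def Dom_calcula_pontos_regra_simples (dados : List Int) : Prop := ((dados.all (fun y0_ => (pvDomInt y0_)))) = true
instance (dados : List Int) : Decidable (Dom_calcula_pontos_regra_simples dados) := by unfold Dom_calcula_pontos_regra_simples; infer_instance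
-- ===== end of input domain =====

-- B replaces A's single loop of six conditional increments by a divide-and-conquer
-- recursion that scores each half of the list and merges the per-face dicts by addition
-- (objective: alternative).


-- ===== PORT A =====
-- one iteration of A's loop body (six independent conditional increments)
def pvStepA (r : PySem.Dict Int Int) (d : Int) : PySem.Dict Int Int :=
  let r := if d == 1 then r.modify 1 0 (· + 1) else r
  let r := if d == 2 then r.modify 2 0 (· + 2) else r
  let r := if d == 3 then r.modify 3 0 (· + 3) else r
  let r := if d == 4 then r.modify 4 0 (· + 4) else r
  let r := if d == 5 then r.modify 5 0 (· + 5) else r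
  let r := if d == 6 then r.modify 6 0 (· + 6) else r
  r

def calcula_pontos_regra_simples (dados : List Int) : List (Int × Int) :=
  let resultado : PySem.Dict Int Int :=
    PySem.Dict.ofList [(1, 0), (2, 0), (3, 0), (4, 0), (5, 0), (6, 0)]
  (dados.foldl pvStepA resultado).items

-- ===== PORT B =====
-- dict lookup esq[k]; a KeyError is impossible here (keys 1..6 are always present),
-- so the none branch is unreachable
def pvVal (l : List (Int × Int)) (k : Int) : Int :=
  match l.find? (fun p => p.1 == k) with
  | some p => p.2
  | none => 0

def calcula_pontos_regra_simples_alt (dados : List Int) : List (Int × Int) :=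
  if h0 : dados = [] then
    (PySem.List.pyRange 1 7 1).map (fun k => (k, (0 : Int)))
  else if h1 : dados.length = 1 then
    -- d = dados[0]; the list is nonempty so the index is in range
    let d := ((PySem.List.pyGet? dados 0).getD 0)
    (PySem.List.pyRange 1 7 1).map (fun k => (k, if d = k then k else 0))
  else
    -- mid = len(dados) // 2 (both nonnegative, so Nat division is Python's //)
    let mid := dados.length / 2
    let esq := calcula_pontos_regra_simples_alt (dados.take mid)
    let dire := calcula_pontos_regra_simples_alt (dados.drop mid)
    (PySem.List.pyRange 1 7 1).map (fun k => (k, pvVal esq k + pvVal dire k))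
termination_by dados.length
decreasing_by
  all_goals
    have hlen0 : dados.length ≠ 0 := fun h => h0 (List.length_eq_zero_iff.mp h)
    first
      | (simp only [List.length_take]; omega)
      | (simp only [List.length_drop]; omega)

-- ===== PRECONDITION & SPEC =====
def Spec_calcula_pontos_regra_simples (dados : List Int) (out : List (Int × Int)) : Prop := out = calcula_pontos_regra_simples_alt dados
instance (dados : List Int) (out : List (Int × Int)) : Decidable (Spec_calcula_pontos_regra_simples dados out) := by unfold Spec_calcula_pontos_regra_simples; infer_instance

-- ===== CLAIM (what is proved, stated in full; the proofs are below) =====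
def Claim_equal_calcula_pontos_regra_simples : Prop := ∀ (dados : List Int), Dom_calcula_pontos_regra_simples dados → Spec_calcula_pontos_regra_simples dados (calcula_pontos_regra_simples dados)

-- ===== LEMMAS AND PROOFS =====

-- the common normal form: face k ↦ count · k, for k = 1..6
def pvTgt (l : List Int) : List (Int × Int) :=
  [1, 2, 3, 4, 5, 6].map (fun k => (k, (l.count k : Int) * k))

theorem pvStepA_getD (r : PySem.Dict Int Int) (x v : Int) :
    (pvStepA r x).getD v 0 = r.getD v 0 + (if v = x ∧ 1 ≤ v ∧ v ≤ 6 then v else 0) := by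
  simp only [pvStepA, beq_iff_eq]
  split_ifs <;> simp_all [PySem.Dict.getD_modify] <;> (try split_ifs) <;> omega

theorem pvStepA_keys (r : PySem.Dict Int Int) (x : Int)
    (h : r.keys = [1, 2, 3, 4, 5, 6]) : (pvStepA r x).keys = [1, 2, 3, 4, 5, 6] := by
  simp only [pvStepA, beq_iff_eq]
  split_ifs <;>
    simp_all [PySem.Dict.keys_modify, PySem.Dict.keys_insert_of_contains,
      PySem.Dict.contains_eq_decide_mem_keys]

theorem pvFold_keys (l : List Int) (r : PySem.Dict Int Int)
    (h : r.keys = [1, 2, 3, 4, 5, 6]) : (l.foldl pvStepA r).keys = [1, 2, 3, 4, 5, 6] := by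
  induction l generalizing r with
  | nil => simpa using h
  | cons x l ih => exact ih _ (pvStepA_keys r x h)

theorem pvFold_getD (l : List Int) (r : PySem.Dict Int Int) (v : Int) :
    (l.foldl pvStepA r).getD v 0 =
      r.getD v 0 + (if 1 ≤ v ∧ v ≤ 6 then (l.count v : Int) * v else 0) := by
  induction l generalizing r with
  | nil => simp
  | cons x l ih =>
    rw [List.foldl_cons, ih, pvStepA_getD, List.count_cons]
    by_cases hx : v = x
    · subst hx
      split_ifs <;> push_cast <;> (try ring) <;> simp_all
    · have hx' : ¬ x = v := fun h => hx h.symm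
      simp only [hx, false_and, if_false, add_zero]
      split_ifs <;> push_cast <;> (try ring) <;> simp_all

-- A computes the normal form
theorem pvA_eq_tgt (dados : List Int) : calcula_pontos_regra_simples dados = pvTgt dados := by
  unfold calcula_pontos_regra_simples pvTgt
  have hkeys : (dados.foldl pvStepA
      (PySem.Dict.ofList [(1, 0), (2, 0), (3, 0), (4, 0), (5, 0), (6, 0)])).keys
      = [1, 2, 3, 4, 5, 6] := pvFold_keys _ _ (by decide)
  have hnd : (dados.foldl pvStepA
      (PySem.Dict.ofList [(1, 0), (2, 0), (3, 0), (4, 0), (5, 0), (6, 0)])).keys.Nodup := by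
    rw [hkeys]; decide
  have h0 : ∀ k ∈ ([1, 2, 3, 4, 5, 6] : List Int),
      (PySem.Dict.ofList [((1:Int), (0:Int)), (2, 0), (3, 0), (4, 0), (5, 0), (6, 0)]).getD k 0 = 0 := by
    decide
  rw [PySem.Dict.items_eq_map_keys _ hnd 0, hkeys]
  simp only [List.map_cons, List.map_nil, pvFold_getD,
    h0 1 (by decide), h0 2 (by decide), h0 3 (by decide), h0 4 (by decide),
    h0 5 (by decide), h0 6 (by decide)]
  norm_num

theorem pvVal_tgt (l : List Int) (k : Int) (hk : k ∈ ([1, 2, 3, 4, 5, 6] : List Int)) :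
    pvVal (pvTgt l) k = (l.count k : Int) * k := by
  fin_cases hk <;> simp [pvTgt, pvVal, List.find?]

-- B computes the normal form (strong induction on length, halves merge by count_append)
theorem pvB_eq_tgt (dados : List Int) :
    calcula_pontos_regra_simples_alt dados = pvTgt dados := by
  induction hn : dados.length using Nat.strong_induction_on generalizing dados with
  | _ n ih =>
  subst hn
  rw [calcula_pontos_regra_simples_alt]
  have hpr : PySem.List.pyRange (1:Int) 7 1 = [1, 2, 3, 4, 5, 6] := by decide
  by_cases h0 : dados = []
  · subst h0; decide
  · simp only [h0, dif_neg, not_false_iff]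
    by_cases h1 : dados.length = 1
    · simp only [h1, dif_pos]
      obtain ⟨d, rfl⟩ : ∃ d, dados = [d] := List.length_eq_one_iff.mp h1
      have hd : (PySem.List.pyGet? [d] 0).getD 0 = d := by
        simp [PySem.List.pyGet?, PySem.List.pyIdx?]
      simp only [hpr, hd, pvTgt, List.map_cons, List.map_nil,
        List.cons.injEq, Prod.mk.injEq, and_true, true_and]
      refine ⟨?_, ?_, ?_, ?_, ?_, ?_⟩ <;>
        (split_ifs with hk <;> simp [hk, List.count_cons, List.count_nil])
    · simp only [h1, dif_neg, not_false_iff]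
      have hne0 : dados.length ≠ 0 := fun h => h0 (List.length_eq_zero_iff.mp h)
      have hta : (dados.take (dados.length / 2)).length < dados.length := by
        simp only [List.length_take]; omega
      have hda : (dados.drop (dados.length / 2)).length < dados.length := by
        simp only [List.length_drop]; omega
      rw [ih _ hta _ rfl, ih _ hda _ rfl]
      have hcount : ∀ k : Int, dados.count k =
          (dados.take (dados.length / 2)).count k +
          (dados.drop (dados.length / 2)).count k := by
        intro k
        conv_lhs => rw [← List.take_append_drop (dados.length / 2) dados]
        rw [List.count_append]
      simp only [hpr, List.map_cons, List.map_nil,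
        pvVal_tgt _ 1 (by decide), pvVal_tgt _ 2 (by decide), pvVal_tgt _ 3 (by decide),
        pvVal_tgt _ 4 (by decide), pvVal_tgt _ 5 (by decide), pvVal_tgt _ 6 (by decide)]
      simp only [pvTgt, List.map_cons, List.map_nil, hcount,
        List.cons.injEq, Prod.mk.injEq, and_true, true_and]
      refine ⟨?_, ?_, ?_, ?_, ?_, ?_⟩ <;> (push_cast; ring)

-- ===== VERDICT (by name: the statement is the Claim_ definition above) =====
theorem calcula_pontos_regra_simples_spec : Claim_equal_calcula_pontos_regra_simples := by
  intro dados _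
  unfold Spec_calcula_pontos_regra_simples
  rw [pvA_eq_tgt, pvB_eq_tgt]
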